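-- pv_equiv track=rewrite | github.com/vinibailo/TT-Game-Liste-2 | app.py | _normalize_translation_key
-- ===== SOURCE A (Python) =====
-- def _normalize_translation_key(value: str) -> str:
--     key = str(value).strip().casefold()
--     for old, new in (
--         ('&', ' and '),
--         ('/', ' '),
--         ('-', ' '),
--         ('_', ' '),
--         ("'", ''),
--         (',', ' '),
--         ('.', ' '),
--         ('+', ' '),
--     ):
--         key = key.replace(old, new)
--     for char in '()[]{}':
--         key = key.replace(char, ' ')
--     key = ''.join(ch for ch in key if ch.isalnum() or ch.isspace())
--     return ' '.join(key.split())
-- ===== SOURCE B (Python) =====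
-- _NK_TABLE = {
--     '&': ' and ',
--     "'": '',
--     '/': ' ', '-': ' ', '_': ' ', ',': ' ', '.': ' ', '+': ' ',
--     '(': ' ', ')': ' ', '[': ' ', ']': ' ', '{': ' ', '}': ' ',
-- }
--
--
-- def _normalize_translation_key(value: str) -> str:
--     key = str(value).strip().casefold()
--     out = []
--     for ch in key:
--         mapped = _NK_TABLE.get(ch)
--         if mapped is not None:
--             out.append(mapped)
--         elif ch.isalnum() or ch.isspace():
--             out.append(ch)
--     return ' '.join(''.join(out).split())
-- ===== Notes on version B (the rewrite author's own statement) =====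
-- stated objective: simpler
-- what changed: Replaces A's fourteen sequential full-string str.replace passes plus a separate filter pass with one table-driven traversal that maps, keeps or drops each character in a single pass.
import Mathlib
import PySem

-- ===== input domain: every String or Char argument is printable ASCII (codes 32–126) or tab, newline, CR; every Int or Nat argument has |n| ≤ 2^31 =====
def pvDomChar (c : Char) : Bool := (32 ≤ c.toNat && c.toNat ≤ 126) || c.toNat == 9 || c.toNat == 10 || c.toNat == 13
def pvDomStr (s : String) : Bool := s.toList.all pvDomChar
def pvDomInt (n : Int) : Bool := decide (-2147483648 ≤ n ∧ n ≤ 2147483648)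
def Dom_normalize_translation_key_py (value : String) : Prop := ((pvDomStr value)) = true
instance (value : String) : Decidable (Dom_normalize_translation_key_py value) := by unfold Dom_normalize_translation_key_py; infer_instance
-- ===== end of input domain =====

-- B replaces A's fourteen sequential str.replace passes plus a filter pass by one table-driven
-- traversal of the string (objective: simpler, one pass instead of many).

-- ===== PORT A =====
-- str(value) on a str is the identity; .casefold() ported as Chars.lower, exact on this file's ASCII domain
def normalize_translation_key_py (value : String) : String :=
  let key0 := PySem.Chars.lower (PySem.Chars.strip value.toList)
  let key1 := PySem.Chars.replace key0 ['&'] (" and ".toList)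
  let key2 := PySem.Chars.replace key1 ['/'] [' ']
  let key3 := PySem.Chars.replace key2 ['-'] [' ']
  let key4 := PySem.Chars.replace key3 ['_'] [' ']
  let key5 := PySem.Chars.replace key4 ['\''] []
  let key6 := PySem.Chars.replace key5 [','] [' ']
  let key7 := PySem.Chars.replace key6 ['.'] [' ']
  let key8 := PySem.Chars.replace key7 ['+'] [' ']
  let key9 := PySem.Chars.replace key8 ['('] [' ']
  let key10 := PySem.Chars.replace key9 [')'] [' ']
  let key11 := PySem.Chars.replace key10 ['['] [' ']
  let key12 := PySem.Chars.replace key11 [']'] [' ']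
  let key13 := PySem.Chars.replace key12 ['{'] [' ']
  let key14 := PySem.Chars.replace key13 ['}'] [' ']
  let key15 := List.filter (fun ch => PySem.Chars.isalnum ch || PySem.Chars.isspace ch) key14
  String.ofList (PySem.Chars.join [' '] (PySem.Chars.split₀ key15))

-- ===== PORT B =====
def nkTable : PySem.Dict Char (List Char) :=
  ⟨[('&', " and ".toList), ('\'', []),
    ('/', [' ']), ('-', [' ']), ('_', [' ']), (',', [' ']), ('.', [' ']), ('+', [' ']),
    ('(', [' ']), (')', [' ']), ('[', [' ']), (']', [' ']), ('{', [' ']), ('}', [' '])]⟩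

def normalize_translation_key_py_alt (value : String) : String :=
  let key := PySem.Chars.lower (PySem.Chars.strip value.toList)
  let out := key.flatMap (fun ch =>
    match nkTable.get? ch with
    | some mapped => mapped
    | none => if PySem.Chars.isalnum ch || PySem.Chars.isspace ch then [ch] else [])
  String.ofList (PySem.Chars.join [' '] (PySem.Chars.split₀ out))

-- ===== PRECONDITION & SPEC =====
def Spec_normalize_translation_key_py (value : String) (out : String) : Prop := out = normalize_translation_key_py_alt value
instance (value : String) (out : String) : Decidable (Spec_normalize_translation_key_py value out) := by unfold Spec_normalize_translation_key_py; infer_instance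

-- ===== CLAIM (what is proved, stated in full; the proofs are below) =====
def Claim_equal_normalize_translation_key_py : Prop := ∀ (value : String), Dom_normalize_translation_key_py value → Spec_normalize_translation_key_py value (normalize_translation_key_py value)

-- ===== LEMMAS AND PROOFS =====

-- replacing a single character o by `new` is a flatMap over the characters
def repF (o : Char) (new : List Char) (c : Char) : List Char := if c = o then new else [c]

theorem replace_go_single (o : Char) (new : List Char) :
    ∀ (fuel : Nat) (l acc : List Char), l.length ≤ fuel →
      PySem.Chars.replace.go [o] new fuel l acc
        = acc.reverse ++ l.flatMap (repF o new) := by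
  intro fuel
  induction fuel with
  | zero =>
    intro l acc h
    have : l = [] := List.length_eq_zero_iff.mp (Nat.le_zero.mp h)
    subst this
    simp [PySem.Chars.replace.go]
  | succ n ih =>
    intro l acc h
    cases l with
    | nil => simp [PySem.Chars.replace.go]
    | cons c t =>
      simp only [PySem.Chars.replace.go]
      by_cases hc : c = o
      · subst hc
        have hp : List.isPrefixOf [c] (c :: t) = true := by simp [List.isPrefixOf]
        rw [if_pos hp]
        rw [ih _ _ (by simpa using Nat.succ_le_succ_iff.mp h)]
        simp [repF, List.flatMap_cons]
      · have hp : List.isPrefixOf [o] (c :: t) = false := by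
          simp [List.isPrefixOf]
          exact fun h' => absurd h'.symm hc
        rw [if_neg (by simp [hp])]
        rw [ih _ _ (by simpa using Nat.succ_le_succ_iff.mp h)]
        simp [repF, hc, List.flatMap_cons]

theorem replace_single (l : List Char) (o : Char) (new : List Char) :
    PySem.Chars.replace l [o] new = l.flatMap (repF o new) := by
  simp only [PySem.Chars.replace, List.isEmpty_cons]
  exact replace_go_single o new l.length l [] (le_refl _)

-- the per-character mapping B uses
def nkMap (ch : Char) : List Char :=
  match nkTable.get? ch with
  | some mapped => mapped
  | none => if PySem.Chars.isalnum ch || PySem.Chars.isspace ch then [ch] else []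

-- A's replace chain followed by its filter equals B's single pass, character by character
theorem chain_eq_nkMap (c : Char) :
    List.filter (fun ch => PySem.Chars.isalnum ch || PySem.Chars.isspace ch)
      ((repF '&' (" and ".toList) c).flatMap (fun x =>
       (repF '/' [' '] x).flatMap (fun x =>
       (repF '-' [' '] x).flatMap (fun x =>
       (repF '_' [' '] x).flatMap (fun x =>
       (repF '\'' [] x).flatMap (fun x =>
       (repF ',' [' '] x).flatMap (fun x =>
       (repF '.' [' '] x).flatMap (fun x =>
       (repF '+' [' '] x).flatMap (fun x =>
       (repF '(' [' '] x).flatMap (fun x =>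
       (repF ')' [' '] x).flatMap (fun x =>
       (repF '[' [' '] x).flatMap (fun x =>
       (repF ']' [' '] x).flatMap (fun x =>
       (repF '{' [' '] x).flatMap (repF '}' [' '])))))))))))))) = nkMap c := by
  by_cases h1 : c = '&'; · subst h1; decide
  by_cases h2 : c = '/'; · subst h2; decide
  by_cases h3 : c = '-'; · subst h3; decide
  by_cases h4 : c = '_'; · subst h4; decide
  by_cases h5 : c = '\''; · subst h5; decide
  by_cases h6 : c = ','; · subst h6; decide
  by_cases h7 : c = '.'; · subst h7; decide
  by_cases h8 : c = '+'; · subst h8; decide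
  by_cases h9 : c = '('; · subst h9; decide
  by_cases h10 : c = ')'; · subst h10; decide
  by_cases h11 : c = '['; · subst h11; decide
  by_cases h12 : c = ']'; · subst h12; decide
  by_cases h13 : c = '{'; · subst h13; decide
  by_cases h14 : c = '}'; · subst h14; decide
  have hf : nkTable.get? c = none := by
    have : List.find? (fun p => p.1 == c) nkTable.items = none := by
      apply List.find?_eq_none.mpr
      intro a ha
      fin_cases ha <;> (simp only [beq_iff_eq]; intro h; subst h; simp_all)
    rw [PySem.Dict.get?, this]; rfl
  simp only [repF, nkMap, hf, if_neg h1, if_neg h2, if_neg h3, if_neg h4, if_neg h5, if_neg h6,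
    if_neg h7, if_neg h8, if_neg h9, if_neg h10, if_neg h11, if_neg h12, if_neg h13, if_neg h14,
    List.flatMap_cons, List.flatMap_nil, List.append_nil, List.filter]
  cases hA : PySem.Chars.isalnum c <;> cases hS : PySem.Chars.isspace c <;> simp

-- ===== VERDICT (by name: the statement is the Claim_ definition above) =====
theorem normalize_translation_key_py_spec : Claim_equal_normalize_translation_key_py := by
  intro value _
  unfold Spec_normalize_translation_key_py
  unfold normalize_translation_key_py normalize_translation_key_py_alt
  simp only [replace_single, List.flatMap_assoc]
  congr 2
  rw [List.filter_flatMap]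
  exact congrArg PySem.Chars.split₀ (List.flatMap_congr (fun c _ => chain_eq_nkMap c))
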